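-- pv_equiv track=rewrite | github.com/gyuelgyuel/Programmers_sol | 프로그래머스/unrated/159994. 카드 뭉치/카드 뭉치.py | solution
-- ===== SOURCE A (Python) =====
-- def solution(cards1, cards2, goal):
--     for g_word in goal:
--         not_exist = True            # 원하는 단어 없으면 True
--         if len(cards1)!=0:
--             if g_word==cards1[0]:   # cards1의 다음카드와 같으면
--                 cards1.remove(g_word)   # 카드더미에서 카드 제거
--                 not_exist = False   # 원하는 단어 있음으로 변경
--         if len(cards2)!=0:
--             if g_word==cards2[0]:
--                 cards2.remove(g_word)
--                 not_exist = False
--         if not_exist:   # 원하는 단어 없으면 no return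
--             return "No"
--     return "Yes"
-- ===== SOURCE B (Python) =====
-- def solution(cards1, cards2, goal):
--     i = j = 0
--     for g in goal:
--         ok = False
--         if i < len(cards1) and cards1[i] == g:
--             i += 1
--             ok = True
--         if j < len(cards2) and cards2[j] == g:
--             j += 1
--             ok = True
--         if not ok:
--             return "No"
--     return "Yes"
-- ===== Notes on version B (the rewrite author's own statement) =====
-- stated objective: alternative
-- what changed: B walks two index pointers over the unchanged decks instead of mutating them with list.remove after a head test; equivalence is about the return value only (A pops matched cards from cards1/cards2 in place, B does not mutate).
import Mathlib
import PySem

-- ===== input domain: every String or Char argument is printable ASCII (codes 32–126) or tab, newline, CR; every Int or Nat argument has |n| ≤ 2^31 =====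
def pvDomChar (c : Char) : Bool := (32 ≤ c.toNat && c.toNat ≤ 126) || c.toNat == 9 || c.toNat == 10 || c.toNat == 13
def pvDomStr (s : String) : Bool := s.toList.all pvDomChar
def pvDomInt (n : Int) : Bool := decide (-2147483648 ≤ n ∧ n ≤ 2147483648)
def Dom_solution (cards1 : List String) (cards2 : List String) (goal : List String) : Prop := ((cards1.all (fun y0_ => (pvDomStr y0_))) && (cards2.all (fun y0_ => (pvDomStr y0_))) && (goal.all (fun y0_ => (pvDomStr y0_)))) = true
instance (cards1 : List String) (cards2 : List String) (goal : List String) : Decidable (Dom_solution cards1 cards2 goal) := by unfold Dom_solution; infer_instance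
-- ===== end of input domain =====

-- B replaces A's in-place list.remove mutation by two index pointers over the unchanged decks (objective: alternative; equivalence is about the RETURN value only — A pops matched cards from cards1/cards2 in place, B does not mutate).
-- Equivalence is about the RETURN value only: A pops matched cards from cards1/cards2 in place, B does not mutate.

-- ===== PORT A =====
-- loop over goal; each deck checked via its head (cards[0]), matched card removed with list.remove
-- (remove is guarded by the head test, so remove? always returns some here; .getD keeps the port total)
def solGoA (cards1 cards2 : List String) (goal : List String) : String :=
  match goal with
  | [] => "Yes"
  | g :: rest =>
    -- not_exist starts true
    let r1 : List String × Bool :=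
      if cards1.length ≠ 0 then
        if PySem.List.pyGet? cards1 0 = some g then ((PySem.List.remove? cards1 g).getD cards1, false)
        else (cards1, true)
      else (cards1, true)
    let r2 : List String × Bool :=
      if cards2.length ≠ 0 then
        if PySem.List.pyGet? cards2 0 = some g then ((PySem.List.remove? cards2 g).getD cards2, false)
        else (cards2, r1.2)
      else (cards2, r1.2)
    if r2.2 then "No" else solGoA r1.1 r2.1 rest

def solution (cards1 : List String) (cards2 : List String) (goal : List String) : String :=
  solGoA cards1 cards2 goal

-- ===== PORT B =====
-- two index pointers i, j walk the (unchanged) decks; 'i < len(cards1) and cards1[i] == g' is cards1[i]? = some g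
def solGoB (cards1 cards2 : List String) (goal : List String) (i j : Nat) : String :=
  match goal with
  | [] => "Yes"
  | g :: rest =>
    -- ok starts false
    let q1 : Nat × Bool := if cards1[i]? = some g then (i + 1, true) else (i, false)
    let q2 : Nat × Bool := if cards2[j]? = some g then (j + 1, true) else (j, q1.2)
    if q2.2 = false then "No" else solGoB cards1 cards2 rest q1.1 q2.1

def solution_alt (cards1 : List String) (cards2 : List String) (goal : List String) : String :=
  solGoB cards1 cards2 goal 0 0

-- ===== PRECONDITION & SPEC =====
def Spec_solution (cards1 : List String) (cards2 : List String) (goal : List String) (out : String) : Prop := out = solution_alt cards1 cards2 goal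
instance (cards1 : List String) (cards2 : List String) (goal : List String) (out : String) : Decidable (Spec_solution cards1 cards2 goal out) := by unfold Spec_solution; infer_instance

-- ===== CLAIM (what is proved, stated in full; the proofs are below) =====
def Claim_equal_solution : Prop := ∀ (cards1 : List String) (cards2 : List String) (goal : List String), Dom_solution cards1 cards2 goal → Spec_solution cards1 cards2 goal (solution cards1 cards2 goal)

-- ===== LEMMAS AND PROOFS =====

-- one deck-step of A, run on the suffix l.drop k, in terms of the pointer k
lemma deck_step (l : List String) (k : Nat) (g : String) (b : Bool) :
    (if (l.drop k).length ≠ 0 then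
       if PySem.List.pyGet? (l.drop k) 0 = some g then
         ((PySem.List.remove? (l.drop k) g).getD (l.drop k), false)
       else (l.drop k, b)
     else (l.drop k, b))
    = if l[k]? = some g then (l.drop (k + 1), false) else (l.drop k, b) := by
  cases hk : l[k]? with
  | none =>
    have hlen : l.length ≤ k := by
      by_contra h
      exact absurd hk (by simp [List.getElem?_eq_getElem (by omega : k < l.length)])
    simp [List.drop_eq_nil_of_le hlen]
  | some x =>
    have hklt : k < l.length := (List.getElem?_eq_some_iff.mp hk).1
    have hx : l[k] = x := (List.getElem?_eq_some_iff.mp hk).2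
    have hdrop : l.drop k = x :: l.drop (k + 1) := by
      rw [List.drop_eq_getElem_cons hklt, hx]
    rw [hdrop]
    by_cases hxg : x = g
    · subst hxg
      simp [PySem.List.remove?_cons_self]
    · simp [fun h => hxg h]

lemma key (goal : List String) : ∀ (c1 c2 : List String) (i j : Nat),
    solGoA (c1.drop i) (c2.drop j) goal = solGoB c1 c2 goal i j := by
  induction goal with
  | nil => intro c1 c2 i j; rfl
  | cons g rest ih =>
    intro c1 c2 i j
    simp only [solGoA, solGoB, deck_step]
    by_cases h1 : c1[i]? = some g <;> by_cases h2 : c2[j]? = some g <;>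
      simp [h1, h2, ih]

-- ===== VERDICT (by name: the statement is the Claim_ definition above) =====
theorem solution_spec : Claim_equal_solution := by
  intro c1 c2 goal _
  show solution c1 c2 goal = solution_alt c1 c2 goal
  have := key goal c1 c2 0 0
  simpa [solution, solution_alt] using this
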